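-- pv_equiv track=rewrite | github.com/RoKivals/Exam-Programming-EGE | EGE#17/ege#17(52).py | end_16
-- ===== SOURCE A (Python) =====
-- def end_16(i):
--     for n in range(2):
--         if i % 16 == 10:
--             i //= 16
--             if i % 16 == 15:
--                 return True
--             else:
--                 return False
--         else:
--             return False
-- ===== SOURCE B (Python) =====
-- def end_16(i):
--     return i % 256 == 250
-- ===== Notes on version B (the rewrite author's own statement) =====
-- stated objective: simpler
-- what changed: Replaced the loop with hex-digit extraction (i%16, i//=16) by the single closed-form modular test i % 256 == 250, which is equivalent under Python floor semantics.
import Mathlib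
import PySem

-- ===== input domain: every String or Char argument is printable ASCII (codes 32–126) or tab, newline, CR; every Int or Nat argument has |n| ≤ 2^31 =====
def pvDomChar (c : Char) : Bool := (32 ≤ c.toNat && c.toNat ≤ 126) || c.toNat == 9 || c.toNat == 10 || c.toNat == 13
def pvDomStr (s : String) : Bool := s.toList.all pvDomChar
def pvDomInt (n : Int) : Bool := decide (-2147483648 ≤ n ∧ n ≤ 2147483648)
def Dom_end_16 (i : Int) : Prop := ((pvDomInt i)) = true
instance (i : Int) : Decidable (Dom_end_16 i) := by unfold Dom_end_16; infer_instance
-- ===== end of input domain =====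

-- B replaces A's loop with digit extraction by the single closed-form test i % 256 == 250 (simpler).


-- ===== PORT A =====
-- the for-loop: returns on the first iteration on every path; Python's
-- unreachable fall-through (None) is modelled as the 'none' case of the Option
def end_16_loop : List Int → Int → Option Bool
  | [], _ => none
  | _ :: _, i =>
      if PySem.Int.mod i 16 = 10 then
        let i' := PySem.Int.floordiv i 16
        if PySem.Int.mod i' 16 = 15 then some true else some false
      else some false

def end_16 (i : Int) : Bool :=
  (end_16_loop (PySem.List.pyRange 0 2 1) i).getD false

-- ===== PORT B =====
def end_16_alt (i : Int) : Bool := PySem.Int.mod i 256 = 250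

-- ===== PRECONDITION & SPEC =====
def Spec_end_16 (i : Int) (out : Bool) : Prop := out = end_16_alt i
instance (i : Int) (out : Bool) : Decidable (Spec_end_16 i out) := by unfold Spec_end_16; infer_instance

-- ===== CLAIM (what is proved, stated in full; the proofs are below) =====
def Claim_equal_end_16 : Prop := ∀ (i : Int), Dom_end_16 i → Spec_end_16 i (end_16 i)

-- ===== LEMMAS AND PROOFS =====
theorem end_16_eq (i : Int) : end_16 i = end_16_alt i := by
  have h16 : PySem.Int.mod i 16 = i % 16 := PySem.Int.mod_eq_emod_of_pos (by norm_num)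
  have hd : PySem.Int.floordiv i 16 = i / 16 := PySem.Int.floordiv_eq_ediv_of_pos (by norm_num)
  have h16' : PySem.Int.mod (PySem.Int.floordiv i 16) 16 = (i / 16) % 16 := by
    rw [hd]; exact PySem.Int.mod_eq_emod_of_pos (by norm_num)
  have h256 : PySem.Int.mod i 256 = i % 256 := PySem.Int.mod_eq_emod_of_pos (by norm_num)
  have hrange : PySem.List.pyRange 0 2 1 = [0, 1] := by decide
  simp only [end_16, end_16_alt, end_16_loop, hrange, h16, h16', h256]
  by_cases h1 : i % 16 = 10 <;> by_cases h2 : (i / 16) % 16 = 15 <;>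
    simp [h1, h2] <;> omega

-- ===== VERDICT (by name: the statement is the Claim_ definition above) =====
theorem end_16_spec : Claim_equal_end_16 := by
  intro i _
  unfold Spec_end_16
  exact end_16_eq i
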